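-- pv_equiv track=rewrite | github.com/sommars/PHCpack | src/Python/PHCpy2/phcpy/canonize.py | CreateCyclicLists
-- ===== SOURCE A (Python) =====
-- def CreateCyclicLists(n):
--     """
--     Create lists of lists of lists in the desired format that represent the
--     cyclic n root polynomial system for the given n.
--     """
--     system = []
--     for i in range(n-1):
--         equation = []
--         for j in range(n):
--             mon = [0 for x in range(n)]
--             for k in range(i+1):
--                 mon[(j+k)%n]=1
--             equation.append(mon)
--         system.append(equation)
--     mon1 = [0 for x in range(n)]
--     mon2 = [1 for x in range(n)]
--     system.append([mon1,mon2])
--     return system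
-- ===== SOURCE B (Python) =====
-- def CreateCyclicLists(n):
--     """
--     Create lists of lists of lists in the desired format that represent the
--     cyclic n root polynomial system for the given n.
--     """
--     system = [[[1 if (x - j) % n <= i else 0 for x in range(n)]
--                for j in range(n)]
--               for i in range(n - 1)]
--     system.append([[0] * n, [1] * n])
--     return system
-- ===== Notes on version B (the rewrite author's own statement) =====
-- stated objective: simpler
-- what changed: Each monomial is produced directly by a closed-form cyclic-window membership test (x-j) % n <= i over all n coordinates, instead of allocating a zero vector and mutating i+1 windowed positions; the whole system is one nested comprehension.
import Mathlib
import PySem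

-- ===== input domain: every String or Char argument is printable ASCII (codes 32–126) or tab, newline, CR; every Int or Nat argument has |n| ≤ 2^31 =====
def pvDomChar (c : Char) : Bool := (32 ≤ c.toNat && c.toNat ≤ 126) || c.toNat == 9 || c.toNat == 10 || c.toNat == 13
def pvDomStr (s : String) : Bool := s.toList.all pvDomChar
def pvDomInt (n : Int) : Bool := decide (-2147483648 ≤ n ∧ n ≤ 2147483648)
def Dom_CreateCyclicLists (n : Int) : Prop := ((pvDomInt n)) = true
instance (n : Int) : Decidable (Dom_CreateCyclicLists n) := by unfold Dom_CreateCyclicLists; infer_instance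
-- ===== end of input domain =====

-- B replaces A's zero-vector-plus-window-mutation construction by a closed-form
-- cyclic-window membership test per coordinate (objective: simpler).

-- ===== PORT A =====
-- literal transliteration of A: accumulating appends, zeroed vector mutated at
-- the i+1 window offsets (mon[(j+k)%n] = 1; the index (j+k)%n is always in range,
-- ported with PySem.List.pySetD / PySem.Int.mod, exact here).
def CreateCyclicLists (n : Int) : List (List (List Int)) :=
  let system : List (List (List Int)) :=
    (PySem.List.pyRange 0 (n-1) 1).foldl (fun system i =>
      let equation : List (List Int) :=
        (PySem.List.pyRange 0 n 1).foldl (fun equation j =>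
          let mon0 : List Int := (PySem.List.pyRange 0 n 1).map (fun _ => 0)
          let mon : List Int :=
            (PySem.List.pyRange 0 (i+1) 1).foldl
              (fun mon k => PySem.List.pySetD mon (PySem.Int.mod (j+k) n) 1) mon0
          equation ++ [mon]) []
      system ++ [equation]) []
  let mon1 : List Int := List.replicate n.toNat 0   -- [0]*n
  let mon2 : List Int := List.replicate n.toNat 1   -- [1]*n
  system ++ [[mon1, mon2]]

-- ===== PORT B =====
-- literal transliteration of Source B: nested comprehensions with the membership test.
def CreateCyclicLists_alt (n : Int) : List (List (List Int)) :=
  let system : List (List (List Int)) :=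
    (PySem.List.pyRange 0 (n-1) 1).map (fun i =>
      (PySem.List.pyRange 0 n 1).map (fun j =>
        (PySem.List.pyRange 0 n 1).map (fun x =>
          if PySem.Int.mod (x - j) n ≤ i then (1 : Int) else 0)))
  system ++ [[List.replicate n.toNat 0, List.replicate n.toNat 1]]

-- ===== PRECONDITION & SPEC =====
def Spec_CreateCyclicLists (n : Int) (out : List (List (List Int))) : Prop := out = CreateCyclicLists_alt n
instance (n : Int) (out : List (List (List Int))) : Decidable (Spec_CreateCyclicLists n out) := by unfold Spec_CreateCyclicLists; infer_instance

-- ===== CLAIM (what is proved, stated in full; the proofs are below) =====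
def Claim_equal_CreateCyclicLists : Prop := ∀ (n : Int), Dom_CreateCyclicLists n → Spec_CreateCyclicLists n (CreateCyclicLists n)

-- ===== LEMMAS AND PROOFS =====

-- foldl that only appends a singleton is a map
theorem pv_foldl_append_map {α β : Type} (l : List α) (f : α → β) (acc : List β) :
    l.foldl (fun a x => a ++ [f x]) acc = acc ++ l.map f := by
  induction l generalizing acc with
  | nil => simp
  | cons x xs ih => simp [List.foldl_cons, ih]

-- x ≡ j+m mod n, stated on representatives
theorem pv_mod_shift (n x j m : Int) (hx0 : 0 ≤ x) (hxn : x < n)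
    (hm0 : 0 ≤ m) (hmn : m < n) :
    ((x - j) % n = m ↔ x = (j + m) % n) := by
  have hx : x % n = x := Int.emod_eq_of_lt hx0 hxn
  have hmm : m % n = m := Int.emod_eq_of_lt hm0 hmn
  constructor
  · intro h
    have hmeq : Int.ModEq n (x - j) m := by unfold Int.ModEq; rw [h, hmm]
    have h2 := Int.ModEq.add_left j hmeq
    have e : j + (x - j) = x := by ring
    rw [e] at h2
    unfold Int.ModEq at h2
    rw [hx] at h2
    exact h2
  · intro h
    have hxm : Int.ModEq n x (j + m) := by
      rw [h]; exact Int.emod_emod_of_dvd _ (dvd_refl n)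
    have h2 := Int.ModEq.sub_right j hxm
    unfold Int.ModEq at h2
    have e : j + m - j = m := by ring
    rw [e, hmm] at h2
    exact h2

-- core: the window-mutation fold equals the membership-test map, generalized over
-- the number m of window offsets already written
theorem pv_mon_fold (n j : Int) (hn : 0 < n) (m : Nat) (hm : (m : Int) ≤ n) :
    (PySem.List.pyRange 0 (m : Int) 1).foldl
        (fun mon k => PySem.List.pySetD mon (PySem.Int.mod (j+k) n) 1)
        ((PySem.List.pyRange 0 n 1).map (fun _ => 0))
      = (PySem.List.pyRange 0 n 1).map
          (fun x => if PySem.Int.mod (x - j) n < (m : Int) then (1 : Int) else 0) := by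
  induction m with
  | zero =>
    rw [show PySem.List.pyRange 0 ((0:Nat):Int) 1 = [] from
      PySem.List.pyRange_one_eq_nil (by norm_num)]
    simp only [List.foldl_nil]
    apply List.map_congr_left
    intro x _
    rw [if_neg]
    intro h
    exact absurd (PySem.Int.mod_nonneg (x - j) hn) (by omega)
  | succ m ih =>
    have hm' : (m : Int) ≤ n := by push_cast at hm ⊢; omega
    rw [show ((m + 1 : Nat) : Int) = (m : Int) + 1 by push_cast; ring,
        PySem.List.pyRange_one_succ_right (by positivity), List.foldl_append,
        List.foldl_cons, List.foldl_nil, ih hm']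
    -- set at t := (j+m) % n turns the `< m` map into the `< m+1` map
    have ht0 : 0 ≤ PySem.Int.mod (j + (m : Int)) n := PySem.Int.mod_nonneg _ hn
    have htn : PySem.Int.mod (j + (m : Int)) n < n := PySem.Int.mod_lt _ hn
    rw [PySem.List.pySetD_of_nonneg _ _ ht0]
    apply List.ext_getElem
    · simp
    · intro k h1 h2
      have hkn : k < n.toNat := by
        simpa [PySem.List.length_pyRange_one] using h2
      have hkI : (k : Int) < n := by omega
      have hget : (PySem.List.pyRange 0 n 1)[k]'(by
          simpa [PySem.List.length_pyRange_one] using hkn) = (k : Int) := by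
        rw [PySem.List.getElem_pyRange_one]; ring
      rw [List.getElem_set]
      have hmem : PySem.Int.mod ((k : Int) - j) n = (m : Int) ↔
          (k : Int) = PySem.Int.mod (j + (m : Int)) n := by
        rw [PySem.Int.mod_eq_emod_of_pos hn, PySem.Int.mod_eq_emod_of_pos hn]
        exact pv_mod_shift n (k : Int) j (m : Int) (by omega) hkI (by omega)
          (by push_cast at hm; omega)
      by_cases hc : (PySem.Int.mod (j + (m : Int)) n).toNat = k
      · have hkt : (k : Int) = PySem.Int.mod (j + (m : Int)) n := by omega
        rw [if_pos hc, List.getElem_map, hget, if_pos (by rw [hmem.mpr hkt]; omega)]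
      · have hkt : (k : Int) ≠ PySem.Int.mod (j + (m : Int)) n := by omega
        have hne : PySem.Int.mod ((k : Int) - j) n ≠ (m : Int) := fun h => hkt (hmem.mp h)
        rw [if_neg hc, List.getElem_map, List.getElem_map, hget]
        rcases lt_or_ge (PySem.Int.mod ((k : Int) - j) n) (m : Int) with h | h
        · rw [if_pos h, if_pos (by omega)]
        · rw [if_neg (by omega), if_neg (by omega)]

-- one equation of A equals one equation of B
theorem pv_equation (n i : Int) (hn0 : 0 ≤ i) (hin : i < n - 1) :
    ((PySem.List.pyRange 0 n 1).map (fun j =>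
      (PySem.List.pyRange 0 (i+1) 1).foldl
        (fun mon k => PySem.List.pySetD mon (PySem.Int.mod (j+k) n) 1)
        ((PySem.List.pyRange 0 n 1).map (fun _ => 0))))
    = (PySem.List.pyRange 0 n 1).map (fun j =>
        (PySem.List.pyRange 0 n 1).map (fun x =>
          if PySem.Int.mod (x - j) n ≤ i then (1 : Int) else 0)) := by
  have hn : 0 < n := by omega
  apply List.map_congr_left
  intro j _
  have hcast : ((i+1).toNat : Int) = i + 1 := by omega
  have := pv_mon_fold n j hn (i+1).toNat (by omega)
  rw [hcast] at this
  rw [this]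
  apply List.map_congr_left
  intro x _
  by_cases h : PySem.Int.mod (x - j) n ≤ i
  · rw [if_pos (by omega), if_pos h]
  · rw [if_neg (by omega), if_neg h]

-- ===== VERDICT (by name: the statement is the Claim_ definition above) =====
theorem CreateCyclicLists_spec : Claim_equal_CreateCyclicLists := by
  intro n _
  unfold Spec_CreateCyclicLists CreateCyclicLists CreateCyclicLists_alt
  simp only [pv_foldl_append_map, List.nil_append]
  congr 1
  apply List.map_congr_left
  intro i hi
  rw [PySem.List.mem_pyRange_one] at hi
  exact pv_equation n i hi.1 hi.2
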